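-- pv_equiv track=rewrite | github.com/eric22gh/Full-Stack-Django-Course | module-0-fundamentals/Day-11/Advanced_list.py | count_positive_windows
-- ===== SOURCE A (Python) =====
-- def count_positive_windows(list1 : list[int], k : int) -> int:
--     if len(list1) < k:
--         return 0
--     sum_window = sum(list1[:k])
--     count = 1 if sum_window > 0 else 0
--     for i in range(len(list1) - k):
--         sum_window = sum_window - list1[i] + list1[i + k]
--         if sum_window > 0:
--             count += 1
--     return count
-- ===== SOURCE B (Python) =====
-- def count_positive_windows(list1 : list[int], k : int) -> int:
--     n = len(list1)
--     if n < k: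
--         return 0
--     prefix = [0]
--     for x in list1:
--         prefix.append(prefix[-1] + x)
--     return sum(1 for i in range(n - k + 1) if prefix[i + k] - prefix[i] > 0)
-- ===== Notes on version B (the rewrite author's own statement) =====
-- stated objective: alternative
-- what changed: Replaces the running incremental window sum with a precomputed prefix-sum table and a single counting pass over prefix differences.
import Mathlib
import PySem

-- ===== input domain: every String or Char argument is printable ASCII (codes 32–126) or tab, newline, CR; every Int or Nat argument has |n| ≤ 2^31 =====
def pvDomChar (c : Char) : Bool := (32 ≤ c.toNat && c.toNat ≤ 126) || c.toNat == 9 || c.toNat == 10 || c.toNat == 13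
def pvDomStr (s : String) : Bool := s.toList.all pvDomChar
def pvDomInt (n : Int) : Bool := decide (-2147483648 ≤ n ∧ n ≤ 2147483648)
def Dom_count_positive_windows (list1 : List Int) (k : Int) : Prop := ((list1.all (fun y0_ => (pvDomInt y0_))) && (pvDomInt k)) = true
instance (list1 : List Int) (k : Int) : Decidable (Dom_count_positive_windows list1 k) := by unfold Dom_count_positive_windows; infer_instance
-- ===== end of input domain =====

-- B replaces A's running incremental window sum with a precomputed prefix-sum table and one counting pass (alternative decomposition, same cost).


-- ===== PORT A =====
def count_positive_windows (list1 : List Int) (k : Int) : Int :=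
  if (list1.length : Int) < k then 0
  else
    let sum0 := (PySem.List.slice list1 none (some k)).sum
    let count0 : Int := if sum0 > 0 then 1 else 0
    let r := (PySem.List.pyRange 0 ((list1.length : Int) - k) 1).foldl
      (fun (st : Int × Int) i =>
        let s := st.1 - PySem.List.pyGetD list1 i 0 + PySem.List.pyGetD list1 (i + k) 0
        (s, if s > 0 then st.2 + 1 else st.2)) (sum0, count0)
    r.2

-- ===== PORT B =====
def count_positive_windows_alt (list1 : List Int) (k : Int) : Int :=
  if (list1.length : Int) < k then 0
  else
    let pfx := list1.foldl (fun p x => p ++ [PySem.List.pyGetD p (-1) 0 + x]) [(0 : Int)]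
    ((PySem.List.pyRange 0 ((list1.length : Int) - k + 1) 1).map
      (fun i => if PySem.List.pyGetD pfx (i + k) 0 - PySem.List.pyGetD pfx i 0 > 0 then (1 : Int) else 0)).sum

-- ===== PRECONDITION & SPEC =====
-- Pre_ excludes k < 0, on which A (and B alike) raises IndexError: the sliding loop indexes past the end of the list.
def Pre_count_positive_windows (list1 : List Int) (k : Int) : Prop := 0 ≤ k
instance (list1 : List Int) (k : Int) : Decidable (Pre_count_positive_windows list1 k) := by unfold Pre_count_positive_windows; infer_instance

def pvWitness_count_positive_windows : List Int × Int := ([1, -2, 3, 4], 2)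

def Spec_count_positive_windows (list1 : List Int) (k : Int) (out : Int) : Prop := out = count_positive_windows_alt list1 k
instance (list1 : List Int) (k : Int) (out : Int) : Decidable (Spec_count_positive_windows list1 k out) := by unfold Spec_count_positive_windows; infer_instance

-- ===== CLAIM (what is proved, stated in full; the proofs are below) =====
def Claim_equal_count_positive_windows : Prop := ∀ (list1 : List Int) (k : Int), Dom_count_positive_windows list1 k → Pre_count_positive_windows list1 k → Spec_count_positive_windows list1 k (count_positive_windows list1 k)

-- ===== LEMMAS AND PROOFS =====

-- window sum starting at position j, length kn (as a difference of take-sums)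
def pvWin (xs : List Int) (kn j : Nat) : Int := (xs.take (j + kn)).sum - (xs.take j).sum

theorem pv_take_succ_sum (xs : List Int) (j : Nat) (hj : j < xs.length) :
    (xs.take (j + 1)).sum = (xs.take j).sum + xs[j] := by
  rw [List.take_add_one, List.sum_append, List.getElem?_eq_getElem hj]
  simp

-- A's sliding-window fold invariant
theorem pv_foldA (xs : List Int) (k : Int) (hk : 0 ≤ k) (hkn : k.toNat ≤ xs.length)
    (m : Nat) (hm : m ≤ xs.length - k.toNat) (c0 : Int) :
    (PySem.List.pyRange 0 (m : Int) 1).foldl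
      (fun (st : Int × Int) i =>
        let s := st.1 - PySem.List.pyGetD xs i 0 + PySem.List.pyGetD xs (i + k) 0
        (s, if s > 0 then st.2 + 1 else st.2)) (pvWin xs k.toNat 0, c0)
    = (pvWin xs k.toNat m,
       c0 + ((List.range m).map (fun j => if pvWin xs k.toNat (j + 1) > 0 then (1 : Int) else 0)).sum) := by
  induction m with
  | zero => simp [PySem.List.pyRange_one_eq_nil]
  | succ m ih =>
    have hm' : m ≤ xs.length - k.toNat := by omega
    rw [show ((m + 1 : Nat) : Int) = (m : Int) + 1 by push_cast; ring,
        PySem.List.pyRange_one_succ_right (by positivity), List.foldl_append, ih hm']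
    have h1 : m < xs.length := by omega
    have h2 : m + k.toNat < xs.length := by omega
    have e1 : PySem.List.pyGetD xs (m : Int) 0 = xs[m] := PySem.List.pyGetD_ofNat xs m 0 h1
    have e2 : PySem.List.pyGetD xs ((m : Int) + k) 0 = xs[m + k.toNat] := by
      have hcast : (m : Int) + k = ((m + k.toNat : Nat) : Int) := by push_cast; omega
      rw [hcast]
      exact PySem.List.pyGetD_ofNat xs (m + k.toNat) 0 h2
    have hwin : pvWin xs k.toNat m - xs[m] + xs[m + k.toNat] = pvWin xs k.toNat (m + 1) := by
      unfold pvWin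
      rw [pv_take_succ_sum xs m h1,
          show m + 1 + k.toNat = (m + k.toNat) + 1 by omega,
          pv_take_succ_sum xs (m + k.toNat) h2]
      ring
    simp only [List.foldl_cons, List.foldl_nil, e1, e2, hwin, List.range_succ, List.map_append,
      List.sum_append, List.map_cons, List.map_nil, List.sum_cons, List.sum_nil]
    split_ifs <;> rw [Prod.mk.injEq] <;> exact ⟨rfl, by ring⟩

-- B's prefix list is the table of take-sums
def pvPref (xs : List Int) : List Int := (List.range (xs.length + 1)).map (fun j => (xs.take j).sum)

theorem pvPref_append (ys : List Int) (y : Int) :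
    pvPref (ys ++ [y]) = pvPref ys ++ [ys.sum + y] := by
  unfold pvPref
  rw [show (ys ++ [y]).length + 1 = (ys.length + 1) + 1 from by simp, List.range_succ,
      List.map_append]
  congr 1
  · exact List.map_congr_left (fun j hj => by
      rw [List.take_append_of_le_length (by
        have := List.mem_range.mp hj; omega)])
  · simp [List.take_of_length_le]

theorem pv_foldB (xs : List Int) :
    xs.foldl (fun p x => p ++ [PySem.List.pyGetD p (-1) 0 + x]) [(0 : Int)] = pvPref xs := by
  induction xs using List.reverseRecOn with
  | nil => simp [pvPref]
  | append_singleton ys y ih =>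
    rw [List.foldl_append, ih]
    have hne : pvPref ys ≠ [] := by simp [pvPref]
    have hlast : PySem.List.pyGetD (pvPref ys) (-1) 0 = ys.sum := by
      rw [PySem.List.pyGetD_neg_one _ _ hne, List.getLast_eq_getElem]
      simp [pvPref, List.take_of_length_le]
    simp only [List.foldl_cons, List.foldl_nil, hlast]
    exact (pvPref_append ys y).symm

theorem pv_pref_getD (xs : List Int) (j : Nat) (hj : j ≤ xs.length) :
    (pvPref xs).getD j 0 = (xs.take j).sum := by
  unfold pvPref
  rw [List.getD_eq_getElem?_getD, List.getElem?_map, List.getElem?_range (by omega)]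
  rfl

-- ===== VERDICT (by name: the statement is the Claim_ definition above) =====
theorem count_positive_windows_spec : Claim_equal_count_positive_windows := by
  intro xs k _ hk
  have hk0 : 0 ≤ k := hk
  unfold Spec_count_positive_windows count_positive_windows count_positive_windows_alt
  by_cases hlt : (xs.length : Int) < k
  · simp [hlt]
  · simp only [hlt, if_false]
    have hk' : k.toNat ≤ xs.length := by omega
    set kn := k.toNat with hknd
    set m := xs.length - kn with hmd
    have hnk : (xs.length : Int) - k = (m : Int) := by omega
    have hs0 : (PySem.List.slice xs none (some k)).sum = pvWin xs kn 0 := by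
      rw [PySem.List.slice_to xs hk0]
      unfold pvWin; simp
      rw [hknd]

    -- A side
    rw [hnk, hs0, pv_foldA xs k hk0 hk' m (by omega) _]
    -- B side
    rw [pv_foldB, show ((m : Int) + 1) = ((m + 1 : Nat) : Int) from by push_cast; ring,
        PySem.List.pyRange_zero_nat, List.map_map]
    have hmap : ∀ j ∈ List.range (m + 1),
        ((fun i => if PySem.List.pyGetD (pvPref xs) (i + k) 0 - PySem.List.pyGetD (pvPref xs) i 0 > 0 then (1:Int) else 0) ∘ (fun j : Nat => (j : Int))) j
        = (fun j : Nat => if pvWin xs kn j > 0 then (1:Int) else 0) j := by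
      intro j hj
      have hj' : j ≤ m := by have := List.mem_range.mp hj; omega
      have hjk : (j : Int) + k = ((j + kn : Nat) : Int) := by push_cast; omega
      simp only [Function.comp_apply, hjk, PySem.List.pyGetD_natCast]
      rw [pv_pref_getD xs (j + kn) (by omega), pv_pref_getD xs j (by omega)]
      rfl
    rw [List.map_congr_left hmap, List.range_succ_eq_map, List.map_cons, List.sum_cons,
        List.map_map]
    simp [Function.comp_def, Nat.succ_eq_add_one]
    rw [hknd]
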